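-- pv_equiv track=rewrite | github.com/pastorcmentarny/denva | src/tubes_train_service.py | count_tube_color
-- ===== SOURCE A (Python) =====
-- def count_tube_color(stats_list) -> dict:
--     stats_counter = {
--         'Bakerloo': 0,
--         'Central': 0,
--         'Circle': 0,
--         'District': 0,
--         'Hammersmith': 0,
--         'Jubilee': 0,
--         'Metropolitan': 0,
--         'Piccadilly': 0,
--         'Victoria': 0,
--         'Waterloo': 0
--     }
--
--     for stat in stats_list:
--         if 'Bakerloo line' in stat:
--             stats_counter['Bakerloo'] += 1
--         elif 'Central line' in stat:
--             stats_counter['Central'] += 1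
--         elif 'Circle line' in stat:
--             stats_counter['Circle'] += 1
--         elif 'District line' in stat:
--             stats_counter['District'] += 1
--         elif 'Hammersmith & City line' in stat:
--             stats_counter['Hammersmith'] += 1
--         elif 'Jubilee line' in stat:
--             stats_counter['Jubilee'] += 1
--         elif 'Metropolitan line' in stat:
--             stats_counter['Metropolitan'] += 1
--         elif 'Piccadilly line' in stat:
--             stats_counter['Piccadilly'] += 1
--         elif 'Victoria line' in stat:
--             stats_counter['Victoria'] += 1
--         elif 'Waterloo & City line' in stat:
--             stats_counter['Waterloo'] += 1
--
--     return stats_counter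
-- ===== SOURCE B (Python) =====
-- LINES = [
--     ('Bakerloo line', 'Bakerloo'),
--     ('Central line', 'Central'),
--     ('Circle line', 'Circle'),
--     ('District line', 'District'),
--     ('Hammersmith & City line', 'Hammersmith'),
--     ('Jubilee line', 'Jubilee'),
--     ('Metropolitan line', 'Metropolitan'),
--     ('Piccadilly line', 'Piccadilly'),
--     ('Victoria line', 'Victoria'),
--     ('Waterloo & City line', 'Waterloo'),
-- ]
--
--
-- def count_tube_color(stats_list) -> dict:
--     # sieve: one pass per line name over a shrinking pool of stats;
--     # matched stats are removed so later line names never see them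
--     result = {}
--     remaining = list(stats_list)
--     for sub, key in LINES:
--         result[key] = len([s for s in remaining if sub in s])
--         remaining = [s for s in remaining if sub not in s]
--     return result
-- ===== Notes on version B (the rewrite author's own statement) =====
-- stated objective: alternative
-- what changed: B replaces A's per-stat ten-branch elif chain with a per-pattern sieve: for each line name in order it counts the stats still in the pool that contain it, then removes the matched stats from the pool, so the traversal is ten passes over a shrinking list instead of one pass classifying each stat.
import Mathlib
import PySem

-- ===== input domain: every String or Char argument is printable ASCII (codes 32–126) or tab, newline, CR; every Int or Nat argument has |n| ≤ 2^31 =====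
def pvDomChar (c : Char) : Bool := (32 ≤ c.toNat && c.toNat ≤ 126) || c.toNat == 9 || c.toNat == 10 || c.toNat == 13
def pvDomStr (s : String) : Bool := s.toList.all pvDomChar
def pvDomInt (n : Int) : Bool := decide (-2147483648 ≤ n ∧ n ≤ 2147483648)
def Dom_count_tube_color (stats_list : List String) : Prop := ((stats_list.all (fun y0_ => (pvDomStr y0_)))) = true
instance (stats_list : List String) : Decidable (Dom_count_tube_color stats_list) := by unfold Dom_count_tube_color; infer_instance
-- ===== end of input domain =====

-- B is an 'alternative' algorithm: a per-pattern sieve (ten passes over a shrinking pool of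
-- stats, counting then removing the matched ones) instead of A's per-stat elif chain; same cost.

-- ===== PORT A =====
-- one loop step of A: the elif chain updating the counter dict in place
def pvStepA (d : PySem.Dict String Int) (stat : String) : PySem.Dict String Int :=
  if PySem.Str.isIn "Bakerloo line" stat then d.modify "Bakerloo" 0 (· + 1)
  else if PySem.Str.isIn "Central line" stat then d.modify "Central" 0 (· + 1)
  else if PySem.Str.isIn "Circle line" stat then d.modify "Circle" 0 (· + 1)
  else if PySem.Str.isIn "District line" stat then d.modify "District" 0 (· + 1)
  else if PySem.Str.isIn "Hammersmith & City line" stat then d.modify "Hammersmith" 0 (· + 1)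
  else if PySem.Str.isIn "Jubilee line" stat then d.modify "Jubilee" 0 (· + 1)
  else if PySem.Str.isIn "Metropolitan line" stat then d.modify "Metropolitan" 0 (· + 1)
  else if PySem.Str.isIn "Piccadilly line" stat then d.modify "Piccadilly" 0 (· + 1)
  else if PySem.Str.isIn "Victoria line" stat then d.modify "Victoria" 0 (· + 1)
  else if PySem.Str.isIn "Waterloo & City line" stat then d.modify "Waterloo" 0 (· + 1)
  else d

def count_tube_color (stats_list : List String) : List (String × Int) :=
  let stats_counter : PySem.Dict String Int := PySem.Dict.mk
    [("Bakerloo", 0), ("Central", 0), ("Circle", 0), ("District", 0), ("Hammersmith", 0),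
     ("Jubilee", 0), ("Metropolitan", 0), ("Piccadilly", 0), ("Victoria", 0), ("Waterloo", 0)]
  (stats_list.foldl pvStepA stats_counter).items

-- ===== PORT B =====
def pvLines : List (String × String) :=
  [("Bakerloo line", "Bakerloo"), ("Central line", "Central"), ("Circle line", "Circle"),
   ("District line", "District"), ("Hammersmith & City line", "Hammersmith"),
   ("Jubilee line", "Jubilee"), ("Metropolitan line", "Metropolitan"),
   ("Piccadilly line", "Piccadilly"), ("Victoria line", "Victoria"),
   ("Waterloo & City line", "Waterloo")]

-- B's sieve loop: for each (sub, key) count the pool entries containing sub, then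
-- drop them from the pool ('result[key] = len([...]); remaining = [...]')
def pvSieve : List (String × String) → List String → List (String × Int)
  | [], _ => []
  | (sub, key) :: rest, remaining =>
      (key, ((remaining.filter (fun s => PySem.Str.isIn sub s)).length : Int)) ::
        pvSieve rest (remaining.filter (fun s => !(PySem.Str.isIn sub s)))

def count_tube_color_alt (stats_list : List String) : List (String × Int) :=
  pvSieve pvLines stats_list

-- ===== PRECONDITION & SPEC =====
def Spec_count_tube_color (stats_list : List String) (out : List (String × Int)) : Prop := out = count_tube_color_alt stats_list
instance (stats_list : List String) (out : List (String × Int)) : Decidable (Spec_count_tube_color stats_list out) := by unfold Spec_count_tube_color; infer_instance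

-- ===== CLAIM =====
def Claim_equal_count_tube_color : Prop := ∀ (stats_list : List String), Dom_count_tube_color stats_list → Spec_count_tube_color stats_list (count_tube_color stats_list)

-- ===== LEMMAS AND PROOFS =====

-- 'stat belongs to stage i of the sieve': it contains line name i and none of the earlier ones
def pvQ0 : String → Bool := fun s => PySem.Str.isIn "Bakerloo line" s
def pvQ1 : String → Bool := fun s => PySem.Str.isIn "Central line" s && !PySem.Str.isIn "Bakerloo line" s
def pvQ2 : String → Bool := fun s => PySem.Str.isIn "Circle line" s && (!PySem.Str.isIn "Central line" s && !PySem.Str.isIn "Bakerloo line" s)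
def pvQ3 : String → Bool := fun s => PySem.Str.isIn "District line" s && (!PySem.Str.isIn "Circle line" s && (!PySem.Str.isIn "Central line" s && !PySem.Str.isIn "Bakerloo line" s))
def pvQ4 : String → Bool := fun s => PySem.Str.isIn "Hammersmith & City line" s && (!PySem.Str.isIn "District line" s && (!PySem.Str.isIn "Circle line" s && (!PySem.Str.isIn "Central line" s && !PySem.Str.isIn "Bakerloo line" s)))
def pvQ5 : String → Bool := fun s => PySem.Str.isIn "Jubilee line" s && (!PySem.Str.isIn "Hammersmith & City line" s && (!PySem.Str.isIn "District line" s && (!PySem.Str.isIn "Circle line" s && (!PySem.Str.isIn "Central line" s && !PySem.Str.isIn "Bakerloo line" s))))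
def pvQ6 : String → Bool := fun s => PySem.Str.isIn "Metropolitan line" s && (!PySem.Str.isIn "Jubilee line" s && (!PySem.Str.isIn "Hammersmith & City line" s && (!PySem.Str.isIn "District line" s && (!PySem.Str.isIn "Circle line" s && (!PySem.Str.isIn "Central line" s && !PySem.Str.isIn "Bakerloo line" s)))))
def pvQ7 : String → Bool := fun s => PySem.Str.isIn "Piccadilly line" s && (!PySem.Str.isIn "Metropolitan line" s && (!PySem.Str.isIn "Jubilee line" s && (!PySem.Str.isIn "Hammersmith & City line" s && (!PySem.Str.isIn "District line" s && (!PySem.Str.isIn "Circle line" s && (!PySem.Str.isIn "Central line" s && !PySem.Str.isIn "Bakerloo line" s))))))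
def pvQ8 : String → Bool := fun s => PySem.Str.isIn "Victoria line" s && (!PySem.Str.isIn "Piccadilly line" s && (!PySem.Str.isIn "Metropolitan line" s && (!PySem.Str.isIn "Jubilee line" s && (!PySem.Str.isIn "Hammersmith & City line" s && (!PySem.Str.isIn "District line" s && (!PySem.Str.isIn "Circle line" s && (!PySem.Str.isIn "Central line" s && !PySem.Str.isIn "Bakerloo line" s)))))))
def pvQ9 : String → Bool := fun s => PySem.Str.isIn "Waterloo & City line" s && (!PySem.Str.isIn "Victoria line" s && (!PySem.Str.isIn "Piccadilly line" s && (!PySem.Str.isIn "Metropolitan line" s && (!PySem.Str.isIn "Jubilee line" s && (!PySem.Str.isIn "Hammersmith & City line" s && (!PySem.Str.isIn "District line" s && (!PySem.Str.isIn "Circle line" s && (!PySem.Str.isIn "Central line" s && !PySem.Str.isIn "Bakerloo line" s))))))))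

-- the ten-counter dict state A's fold walks through
def pvMkD (c0 c1 c2 c3 c4 c5 c6 c7 c8 c9 : Int) : PySem.Dict String Int :=
  PySem.Dict.mk
    [("Bakerloo", c0), ("Central", c1), ("Circle", c2), ("District", c3), ("Hammersmith", c4),
     ("Jubilee", c5), ("Metropolitan", c6), ("Piccadilly", c7), ("Victoria", c8), ("Waterloo", c9)]

-- B's sieve on the concrete table, collapsed: stage i counts the stats satisfying pvQi
theorem pvSieve_eq (l : List String) :
    pvSieve pvLines l =
      [("Bakerloo", ((l.filter (fun s => pvQ0 s)).length : Int)),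
       ("Central", ((l.filter (fun s => pvQ1 s)).length : Int)),
       ("Circle", ((l.filter (fun s => pvQ2 s)).length : Int)),
       ("District", ((l.filter (fun s => pvQ3 s)).length : Int)),
       ("Hammersmith", ((l.filter (fun s => pvQ4 s)).length : Int)),
       ("Jubilee", ((l.filter (fun s => pvQ5 s)).length : Int)),
       ("Metropolitan", ((l.filter (fun s => pvQ6 s)).length : Int)),
       ("Piccadilly", ((l.filter (fun s => pvQ7 s)).length : Int)),
       ("Victoria", ((l.filter (fun s => pvQ8 s)).length : Int)),
       ("Waterloo", ((l.filter (fun s => pvQ9 s)).length : Int))] := by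
  simp [pvSieve, pvLines, List.filter_filter, pvQ0, pvQ1, pvQ2, pvQ3, pvQ4, pvQ5, pvQ6, pvQ7, pvQ8, pvQ9]

-- per-element step: A's elif chain bumps exactly the counter of the sieve stage the stat falls in
set_option maxHeartbeats 1000000 in
theorem pvStep_eq (x : String) (c0 c1 c2 c3 c4 c5 c6 c7 c8 c9 : Int) :
    pvStepA (pvMkD c0 c1 c2 c3 c4 c5 c6 c7 c8 c9) x =
      pvMkD (c0 + if pvQ0 x then 1 else 0) (c1 + if pvQ1 x then 1 else 0) (c2 + if pvQ2 x then 1 else 0) (c3 + if pvQ3 x then 1 else 0) (c4 + if pvQ4 x then 1 else 0) (c5 + if pvQ5 x then 1 else 0) (c6 + if pvQ6 x then 1 else 0) (c7 + if pvQ7 x then 1 else 0) (c8 + if pvQ8 x then 1 else 0) (c9 + if pvQ9 x then 1 else 0) := by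
  simp only [pvStepA, pvQ0, pvQ1, pvQ2, pvQ3, pvQ4, pvQ5, pvQ6, pvQ7, pvQ8, pvQ9]
  by_cases h0 : PySem.Str.isIn "Bakerloo line" x = true
  · simp_all [pvMkD, PySem.Dict.modify, PySem.Dict.insert, PySem.Dict.getD, PySem.Dict.get?]
  · by_cases h1 : PySem.Str.isIn "Central line" x = true
    · rw [Bool.not_eq_true] at h0
      simp_all [pvMkD, PySem.Dict.modify, PySem.Dict.insert, PySem.Dict.getD, PySem.Dict.get?]
    · by_cases h2 : PySem.Str.isIn "Circle line" x = true
      · rw [Bool.not_eq_true] at h0 h1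
        simp_all [pvMkD, PySem.Dict.modify, PySem.Dict.insert, PySem.Dict.getD, PySem.Dict.get?]
      · by_cases h3 : PySem.Str.isIn "District line" x = true
        · rw [Bool.not_eq_true] at h0 h1 h2
          simp_all [pvMkD, PySem.Dict.modify, PySem.Dict.insert, PySem.Dict.getD, PySem.Dict.get?]
        · by_cases h4 : PySem.Str.isIn "Hammersmith & City line" x = true
          · rw [Bool.not_eq_true] at h0 h1 h2 h3
            simp_all [pvMkD, PySem.Dict.modify, PySem.Dict.insert, PySem.Dict.getD, PySem.Dict.get?]
          · by_cases h5 : PySem.Str.isIn "Jubilee line" x = true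
            · rw [Bool.not_eq_true] at h0 h1 h2 h3 h4
              simp_all [pvMkD, PySem.Dict.modify, PySem.Dict.insert, PySem.Dict.getD, PySem.Dict.get?]
            · by_cases h6 : PySem.Str.isIn "Metropolitan line" x = true
              · rw [Bool.not_eq_true] at h0 h1 h2 h3 h4 h5
                simp_all [pvMkD, PySem.Dict.modify, PySem.Dict.insert, PySem.Dict.getD, PySem.Dict.get?]
              · by_cases h7 : PySem.Str.isIn "Piccadilly line" x = true
                · rw [Bool.not_eq_true] at h0 h1 h2 h3 h4 h5 h6
                  simp_all [pvMkD, PySem.Dict.modify, PySem.Dict.insert, PySem.Dict.getD, PySem.Dict.get?]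
                · by_cases h8 : PySem.Str.isIn "Victoria line" x = true
                  · rw [Bool.not_eq_true] at h0 h1 h2 h3 h4 h5 h6 h7
                    simp_all [pvMkD, PySem.Dict.modify, PySem.Dict.insert, PySem.Dict.getD, PySem.Dict.get?]
                  · by_cases h9 : PySem.Str.isIn "Waterloo & City line" x = true
                    · rw [Bool.not_eq_true] at h0 h1 h2 h3 h4 h5 h6 h7 h8
                      simp_all [pvMkD, PySem.Dict.modify, PySem.Dict.insert, PySem.Dict.getD, PySem.Dict.get?]
                    · rw [Bool.not_eq_true] at h0 h1 h2 h3 h4 h5 h6 h7 h8 h9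
                      simp_all [pvMkD]

-- loop invariant: after folding l, each counter holds its start value plus the
-- number of stats of l falling in that counter's sieve stage
set_option maxHeartbeats 4000000 in
theorem pvMain (l : List String) (c0 c1 c2 c3 c4 c5 c6 c7 c8 c9 : Int) :
    (l.foldl pvStepA (pvMkD c0 c1 c2 c3 c4 c5 c6 c7 c8 c9)).items =
      [("Bakerloo", c0 + ((l.filter (fun s => pvQ0 s)).length : Int)),
       ("Central", c1 + ((l.filter (fun s => pvQ1 s)).length : Int)),
       ("Circle", c2 + ((l.filter (fun s => pvQ2 s)).length : Int)),
       ("District", c3 + ((l.filter (fun s => pvQ3 s)).length : Int)),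
       ("Hammersmith", c4 + ((l.filter (fun s => pvQ4 s)).length : Int)),
       ("Jubilee", c5 + ((l.filter (fun s => pvQ5 s)).length : Int)),
       ("Metropolitan", c6 + ((l.filter (fun s => pvQ6 s)).length : Int)),
       ("Piccadilly", c7 + ((l.filter (fun s => pvQ7 s)).length : Int)),
       ("Victoria", c8 + ((l.filter (fun s => pvQ8 s)).length : Int)),
       ("Waterloo", c9 + ((l.filter (fun s => pvQ9 s)).length : Int))] := by
  induction l generalizing c0 c1 c2 c3 c4 c5 c6 c7 c8 c9 with
  | nil =>
    simp [pvMkD]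
  | cons x l ih =>
    rw [List.foldl_cons, pvStep_eq, ih]
    simp only [List.filter_cons, List.cons.injEq, Prod.mk.injEq, and_true, true_and]
    and_intros <;> first
      | rfl
      | (split_ifs <;> push_cast [List.length_cons] <;> omega)

-- ===== VERDICT =====
theorem count_tube_color_spec : Claim_equal_count_tube_color := by
  intro stats_list _
  unfold Spec_count_tube_color count_tube_color count_tube_color_alt
  have h := pvMain stats_list 0 0 0 0 0 0 0 0 0 0
  simp only [pvMkD] at h
  rw [h, pvSieve_eq]
  simp
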